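-- pv_equiv track=rewrite | github.com/OhhMoo/Aeyes | server.py | _match_location_query
-- ===== SOURCE A (Python) =====
-- from typing import Optional
--
-- def _match_location_query(text: str, locations: list[dict]) -> Optional[dict]:
--     """If text mentions a saved location name, return that location dict."""
--     txt = text.lower()
--     # Prefer the longest matching name so "main kitchen" beats "kitchen".
--     best = None
--     for loc in locations:
--         name = loc["name"].lower()
--         if name and name in txt and (best is None or len(name) > len(best["name"])):
--             best = loc
--     return best
-- ===== SOURCE B (Python) =====
-- from typing import Optional
--
-- def _match_location_query(text: str, locations: list[dict]) -> Optional[dict]: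
--     """If text mentions a saved location name, return that location dict."""
--     txt = text.lower()
--     # Try candidates longest-name first; the stable sort keeps the original
--     # order among equal-length names, so the first match wins on a tie.
--     for loc in sorted(locations, key=lambda l: -len(l["name"])):
--         name = loc["name"].lower()
--         if name and name in txt:
--             return loc
--     return None
-- ===== Notes on version B (the rewrite author's own statement) =====
-- stated objective: alternative
-- what changed: Replaces the running-best scan (tracking the longest matching name seen so far) with a stable length-descending sort of the locations followed by an early return on the first name that occurs in the text.
import Mathlib
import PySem

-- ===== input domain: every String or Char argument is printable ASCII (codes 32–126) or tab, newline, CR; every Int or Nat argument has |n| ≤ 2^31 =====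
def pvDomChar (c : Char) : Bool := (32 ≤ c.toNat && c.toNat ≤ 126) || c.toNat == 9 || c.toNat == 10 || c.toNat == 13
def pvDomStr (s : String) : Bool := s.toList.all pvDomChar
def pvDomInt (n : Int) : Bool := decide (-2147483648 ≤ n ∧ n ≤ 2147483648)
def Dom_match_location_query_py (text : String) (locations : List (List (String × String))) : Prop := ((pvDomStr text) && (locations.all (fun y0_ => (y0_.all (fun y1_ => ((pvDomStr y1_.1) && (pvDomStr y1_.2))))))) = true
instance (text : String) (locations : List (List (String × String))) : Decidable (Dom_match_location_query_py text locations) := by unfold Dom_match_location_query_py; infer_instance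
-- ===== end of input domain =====

-- B replaces A's running-best scan by a stable length-descending sort of the locations plus an early
-- return on the first name occurring in the text (alternative decomposition, same return values).

-- ===== PORT A =====
-- loc["name"]  (Python dict → association list; lookup = first matching key)
def pvLocName (loc : List (String × String)) : String :=
  (List.lookup "name" loc).getD ""

-- A's loop body: name = loc["name"].lower();
-- if name and name in txt and (best is None or len(name) > len(best["name"])): best = loc
def pvStepA (txt : String) (best : Option (List (String × String))) (loc : List (String × String)) :
    Option (List (String × String)) :=
  let name := PySem.Str.lower (pvLocName loc)
  if name != "" && PySem.Str.isIn name txt &&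
      (match best with
       | none => true
       | some b => decide (PySem.Str.len name > PySem.Str.len (pvLocName b)))
  then some loc else best

def match_location_query_py (text : String) (locations : List (List (String × String))) :
    Option (List (String × String)) :=
  let txt := PySem.Str.lower text
  locations.foldl (pvStepA txt) none

-- ===== PORT B =====
-- B's loop: return the first location of the ordered list whose lowered, nonempty name occurs in txt
def pvFirstHit (txt : String) : List (List (String × String)) → Option (List (String × String))
  | [] => none
  | loc :: rest =>
    let name := PySem.Str.lower (pvLocName loc)
    if name != "" && PySem.Str.isIn name txt then some loc else pvFirstHit txt rest

def match_location_query_py_alt (text : String) (locations : List (List (String × String))) :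
    Option (List (String × String)) :=
  let txt := PySem.Str.lower text
  pvFirstHit txt (PySem.List.sorted locations (fun l => -(PySem.Str.len (pvLocName l))) false)

-- ===== PRECONDITION & SPEC =====
-- Pre_ excludes exactly the inputs where some location lacks the "name" key: there the Python A
-- (and B alike) raises KeyError on loc["name"].
def Pre_match_location_query_py (text : String) (locations : List (List (String × String))) : Prop :=
  ∀ loc ∈ locations, (List.lookup "name" loc).isSome = true
instance (text : String) (locations : List (List (String × String))) :
    Decidable (Pre_match_location_query_py text locations) := by
  unfold Pre_match_location_query_py; infer_instance

def pvWitness_match_location_query_py : String × (List (List (String × String))) :=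
  ("Go to the Main Kitchen", [[("name", "kitchen")], [("name", "main kitchen")]])

def Spec_match_location_query_py (text : String) (locations : List (List (String × String))) (out : Option (List (String × String))) : Prop := out = match_location_query_py_alt text locations
instance (text : String) (locations : List (List (String × String))) (out : Option (List (String × String))) : Decidable (Spec_match_location_query_py text locations out) := by unfold Spec_match_location_query_py; infer_instance

-- ===== CLAIM (what is proved, stated in full; the proofs are below) =====
def Claim_equal_match_location_query_py : Prop := ∀ (text : String) (locations : List (List (String × String))), Dom_match_location_query_py text locations → Pre_match_location_query_py text locations → Spec_match_location_query_py text locations (match_location_query_py text locations)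

-- ===== LEMMAS AND PROOFS =====

-- the match predicate shared by both loops (name nonempty and contained in txt)
def pvP (txt : String) (loc : List (String × String)) : Bool :=
  let name := PySem.Str.lower (pvLocName loc)
  name != "" && PySem.Str.isIn name txt

-- B's sort key
def pvK (loc : List (String × String)) : Int := -(PySem.Str.len (pvLocName loc))

-- "append one element on the right" action on the current result: the new, later element wins
-- only with a strictly smaller key (= strictly longer name)
def gsnoc {α : Type} (p : α → Bool) (key : α → Int) (r : Option α) (x : α) : Option α :=
  if p x then
    match r with
    | none => some x
    | some m => if key x < key m then some x else some m
  else r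

-- A's guard on the running best: accept x when there is no best yet or x's key is strictly smaller
def gok {α : Type} (key : α → Int) (x : α) (b : Option α) : Bool :=
  match b with
  | none => true
  | some bb => decide (key x < key bb)

-- "prepend one element on the left": the new, earlier element wins unless a later one is strictly better
def gcons {α : Type} (p : α → Bool) (key : α → Int) (x : α) (r : Option α) : Option α :=
  match r with
  | none => if p x then some x else none
  | some m => if p x then (if key m < key x then some m else some x) else some m

-- the common semantics: first p-element of minimal key (earliest wins a tie)
def gpick {α : Type} (p : α → Bool) (key : α → Int) : List α → Option α
  | [] => none
  | x :: xs => gcons p key x (gpick p key xs)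

-- combining an already-accumulated best (earlier elements) with the pick of the rest
def gcomb {α : Type} (key : α → Int) : Option α → Option α → Option α
  | b, none => b
  | none, some m => some m
  | some b, some m => if key m < key b then some m else some b

lemma pv_len_lower (s : String) : PySem.Str.len (PySem.Str.lower s) = PySem.Str.len s := by
  simp [PySem.Str.len, PySem.Str.lower, PySem.Chars.lower]

lemma stepA_eq (txt : String) (b : Option (List (String × String)))
    (loc : List (String × String)) :
    pvStepA txt b loc = if (pvP txt loc && gok pvK loc b) then some loc else b := by
  cases b <;>
    simp only [pvStepA, pvP, pvK, gok, gt_iff_lt, neg_lt_neg_iff, pv_len_lower, Bool.and_true,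
      Bool.and_assoc]

lemma gcomb_step {α : Type} (p : α → Bool) (key : α → Int) (b : Option α) (x : α) (r : Option α) :
    gcomb key (if (p x && gok key x b) then some x else b) r
      = gcomb key b (gcons p key x r) := by
  rcases b with _ | bb <;> rcases r with _ | m <;> cases hx : p x <;>
    simp [gcomb, gok, gcons, hx] <;>
    (try split_ifs) <;> (try simp [gcomb]) <;> (try split_ifs) <;>
    first | rfl | omega

lemma foldl_stepA (txt : String) (l : List (List (String × String)))
    (b : Option (List (String × String))) :
    l.foldl (pvStepA txt) b = gcomb pvK b (gpick (pvP txt) pvK l) := by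
  induction l generalizing b with
  | nil => cases b <;> rfl
  | cons x l ih =>
    rw [List.foldl_cons, stepA_eq, ih,
      gcomb_step (pvP txt) pvK b x (gpick (pvP txt) pvK l)]
    rfl

lemma A_eq_gpick (text : String) (locations : List (List (String × String))) :
    match_location_query_py text locations
      = gpick (pvP (PySem.Str.lower text)) pvK locations := by
  unfold match_location_query_py
  rw [foldl_stepA]
  cases gpick (pvP (PySem.Str.lower text)) pvK locations <;> rfl

lemma firstHit_eq_find (txt : String) (l : List (List (String × String))) :
    pvFirstHit txt l = l.find? (pvP txt) := by
  induction l with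
  | nil => rfl
  | cons x l ih =>
    have h1 : pvFirstHit txt (x :: l) = if pvP txt x then some x else pvFirstHit txt l := rfl
    rw [h1, ih, List.find?_cons]
    cases hx : pvP txt x <;> simp [hx]

lemma ins_find {α : Type} (p : α → Bool) (key : α → Int) (x : α) (s : List α)
    (hs : s.Pairwise (fun a b => key a ≤ key b)) :
    ((PySem.List.insertBy (fun a b => decide (key a < key b)) x s).find? p)
      = gsnoc p key (s.find? p) x := by
  induction s with
  | nil =>
    cases hx : p x <;> simp [PySem.List.insertBy, gsnoc, List.find?, hx]
  | cons y ys ih =>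
    have hy : ∀ m ∈ ys, key y ≤ key m := (List.pairwise_cons.mp hs).1
    have hys := (List.pairwise_cons.mp hs).2
    by_cases hxy : key x < key y
    · simp only [PySem.List.insertBy, hxy, decide_true, if_true]
      cases hx : p x with
      | false => simp [List.find?_cons, hx, gsnoc]
      | true =>
        cases hf : List.find? p (y :: ys) with
        | none => simp [List.find?_cons, hx, hf, gsnoc]
        | some m =>
          have hm := List.mem_of_find?_eq_some hf
          have hkm : key y ≤ key m := by
            rcases List.mem_cons.mp hm with h | h
            · subst h; exact le_rfl
            · exact hy m h
          simp [List.find?_cons, hx, hf, gsnoc]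
          exact fun h => absurd h (by omega)
    · simp only [PySem.List.insertBy]
      rw [if_neg (by simp [hxy])]
      cases hpy : p y with
      | true =>
        simp only [List.find?_cons, hpy, gsnoc]
        cases hx : p x <;> simp [hx]
        exact fun h => absurd h hxy
      | false =>
        simp only [List.find?_cons, hpy]
        exact ih hys

lemma pick_snoc {α : Type} (p : α → Bool) (key : α → Int) (x : α) (l : List α) :
    gpick p key (l ++ [x]) = gsnoc p key (gpick p key l) x := by
  induction l with
  | nil => by_cases hx : p x <;> simp [gpick, gcons, gsnoc, hx]
  | cons y l ih =>
    simp only [List.cons_append, gpick, ih]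
    cases hgl : gpick p key l <;> cases hx : p x <;> cases hpy : p y <;>
      simp [gsnoc, gcons, hx, hpy] <;>
      (try split_ifs) <;> (try simp [gsnoc, gcons, hx, hpy]) <;> (try split_ifs) <;>
      first | rfl | omega

lemma sorted_snoc {α : Type} (key : α → Int) (l : List α) (x : α) :
    PySem.List.sorted (l ++ [x]) key false
      = PySem.List.insertBy (fun a b => decide (key a < key b)) x
          (PySem.List.sorted l key false) := by
  rw [PySem.List.sorted_eq_foldl_insertBy, PySem.List.sorted_eq_foldl_insertBy,
    List.foldl_append]
  rfl

lemma find_sorted {α : Type} (p : α → Bool) (key : α → Int) (l : List α) :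
    (PySem.List.sorted l key false).find? p = gpick p key l := by
  induction l using List.reverseRecOn with
  | nil => rfl
  | append_singleton l x ih =>
    rw [sorted_snoc, ins_find p key x _ (PySem.List.sorted_pairwise l key), ih, pick_snoc]

-- ===== VERDICT (by name: the statement is the Claim_ definition above) =====
theorem match_location_query_py_spec : Claim_equal_match_location_query_py := by
  intro text locations _ _
  unfold Spec_match_location_query_py
  rw [A_eq_gpick]
  unfold match_location_query_py_alt
  rw [firstHit_eq_find, show (fun l => -(PySem.Str.len (pvLocName l))) = pvK from rfl,
    find_sorted]
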